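-- pv_equiv track=rewrite | github.com/h4sh-basement/pypi-mirror-224 | packages/hpcflow-new2/hpcflow_new2-0.2.0a73.tar.gz/hpcflow_new2-0.2.0a73/hpcflow/sdk/core/task.py | generate_new_elements
-- ===== SOURCE A (Python) =====
-- def generate_new_elements(
--
--     input_data_indices,
--     output_data_indices,
--     element_data_indices,
--     sequence_indices,
--     source_indices,
-- ):
--     new_elements = []
--     element_sequence_indices = {}
--     element_src_indices = {}
--     for i_idx, i in enumerate(element_data_indices):
--         elem_i = {k: input_data_indices[k][v] for k, v in i.items()}
--         elem_i.update({k: v[i_idx] for k, v in output_data_indices.items()})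
--         new_elements.append(elem_i)
--
--         for k, v in i.items():
--             # track which sequence value indices (if any) are used for each new
--             # element:
--             if k in sequence_indices:
--                 if k not in element_sequence_indices:
--                     element_sequence_indices[k] = []
--                 element_sequence_indices[k].append(sequence_indices[k][v])
--
--             # track original InputSource associated with each new element:
--             if k in source_indices:
--                 if k not in element_src_indices:
--                     element_src_indices[k] = []
--                 element_src_indices[k].append(source_indices[k][v])
--
--     return new_elements, element_sequence_indices, element_src_indices
-- ===== SOURCE B (Python) =====
-- def generate_new_elements(
--     input_data_indices,
--     output_data_indices,
--     element_data_indices,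
--     sequence_indices,
--     source_indices,
-- ):
--     # Row pass builds the new elements; the two tracking dicts are then built
--     # key-major (column-wise), one key at a time, instead of interleaved row-major.
--     new_elements = [
--         {
--             **{k: input_data_indices[k][v] for k, v in i.items()},
--             **{k: v[i_idx] for k, v in output_data_indices.items()},
--         }
--         for i_idx, i in enumerate(element_data_indices)
--     ]
--     tracked_keys = dict.fromkeys(k for i in element_data_indices for k in i)
--     element_sequence_indices = {
--         k: [sequence_indices[k][i[k]] for i in element_data_indices if k in i]
--         for k in tracked_keys
--         if k in sequence_indices
--     }
--     element_src_indices = {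
--         k: [source_indices[k][i[k]] for i in element_data_indices if k in i]
--         for k in tracked_keys
--         if k in source_indices
--     }
--     return new_elements, element_sequence_indices, element_src_indices
-- ===== Notes on version B (the rewrite author's own statement) =====
-- stated objective: alternative
-- what changed: A fills the new elements and both tracking dicts in one interleaved row-major loop with lazy list creation; B builds the new elements with a single row comprehension and then constructs each tracking dict key-major (column-wise), collecting one whole column per tracked key from a deduplicated key list.
import Mathlib
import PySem

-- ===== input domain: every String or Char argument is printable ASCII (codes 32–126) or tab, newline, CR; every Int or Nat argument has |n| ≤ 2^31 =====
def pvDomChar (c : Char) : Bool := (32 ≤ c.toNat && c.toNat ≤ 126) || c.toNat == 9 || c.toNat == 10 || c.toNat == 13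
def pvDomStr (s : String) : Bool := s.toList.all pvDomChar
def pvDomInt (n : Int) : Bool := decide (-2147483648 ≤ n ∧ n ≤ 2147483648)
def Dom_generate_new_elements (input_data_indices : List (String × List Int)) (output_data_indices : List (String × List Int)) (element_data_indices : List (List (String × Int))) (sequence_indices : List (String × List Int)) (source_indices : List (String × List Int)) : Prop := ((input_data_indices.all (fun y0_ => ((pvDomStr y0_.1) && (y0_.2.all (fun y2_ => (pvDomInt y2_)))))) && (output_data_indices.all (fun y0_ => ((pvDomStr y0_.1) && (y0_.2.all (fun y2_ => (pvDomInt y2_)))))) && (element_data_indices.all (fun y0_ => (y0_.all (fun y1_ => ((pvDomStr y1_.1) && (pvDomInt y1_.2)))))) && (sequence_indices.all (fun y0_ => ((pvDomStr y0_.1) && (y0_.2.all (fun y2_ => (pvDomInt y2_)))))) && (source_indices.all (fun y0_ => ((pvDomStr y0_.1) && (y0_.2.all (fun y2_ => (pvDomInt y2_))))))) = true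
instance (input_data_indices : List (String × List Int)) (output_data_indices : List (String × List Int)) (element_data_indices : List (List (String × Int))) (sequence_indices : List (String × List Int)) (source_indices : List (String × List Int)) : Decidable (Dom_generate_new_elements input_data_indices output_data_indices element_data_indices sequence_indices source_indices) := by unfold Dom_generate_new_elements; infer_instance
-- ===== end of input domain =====

-- ===== PORT A =====
-- B builds the same result by a different decomposition: a row pass for the new
-- elements plus key-major (column-wise) passes for the two tracking dicts, instead
-- of A's single interleaved row-major pass (objective: alternative; not faster).
-- Shared dict-parameter primitives (both Pythons do `d[k]` and `k in d` on params):
def pvGetList (d : List (String × List Int)) (k : String) : List Int :=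
  ((PySem.Dict.mk d).get? k).getD []
def pvHasKey (d : List (String × List Int)) (k : String) : Bool :=
  (PySem.Dict.mk d).contains k
def generate_new_elements (input_data_indices : List (String × List Int)) (output_data_indices : List (String × List Int)) (element_data_indices : List (List (String × Int))) (sequence_indices : List (String × List Int)) (source_indices : List (String × List Int)) : (List (List (String × Int))) × (List (String × List Int)) × (List (String × List Int)) :=
  let st := (PySem.List.enumerate element_data_indices 0).foldl
    (fun (st : List (List (String × Int)) × PySem.Dict String (List Int) × PySem.Dict String (List Int)) ii =>
      let elem1 : PySem.Dict String Int :=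
        ii.2.foldl (fun d kv =>
          d.insert kv.1 (PySem.List.pyGetD (pvGetList input_data_indices kv.1) kv.2 0))
          PySem.Dict.empty
      let elem2 := output_data_indices.foldl (fun d kv =>
          d.insert kv.1 (PySem.List.pyGetD kv.2 ii.1 0)) elem1
      ii.2.foldl
        (fun st kv =>
          let st2 := if pvHasKey sequence_indices kv.1 then
              (st.1, st.2.1.modify kv.1 []
                 (· ++ [PySem.List.pyGetD (pvGetList sequence_indices kv.1) kv.2 0]), st.2.2)
            else st
          if pvHasKey source_indices kv.1 then
              (st2.1, st2.2.1, st2.2.2.modify kv.1 []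
                 (· ++ [PySem.List.pyGetD (pvGetList source_indices kv.1) kv.2 0]))
          else st2)
        (st.1 ++ [elem2.items], st.2.1, st.2.2))
    ([], PySem.Dict.empty, PySem.Dict.empty)
  (st.1, st.2.1.items, st.2.2.items)

-- ===== PORT B =====
-- `i[k]` and `k in i` on a row dict:
def pvRowGet (i : List (String × Int)) (k : String) : Int :=
  ((PySem.Dict.mk i).get? k).getD 0
def pvRowHas (i : List (String × Int)) (k : String) : Bool :=
  (PySem.Dict.mk i).contains k
def generate_new_elements_alt (input_data_indices : List (String × List Int)) (output_data_indices : List (String × List Int)) (element_data_indices : List (List (String × Int))) (sequence_indices : List (String × List Int)) (source_indices : List (String × List Int)) : (List (List (String × Int))) × (List (String × List Int)) × (List (String × List Int)) :=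
  let new_elements := (PySem.List.enumerate element_data_indices 0).map (fun ii =>
    (PySem.Dict.update
      (ii.2.foldl (fun (d : PySem.Dict String Int) kv =>
         d.insert kv.1 (PySem.List.pyGetD (pvGetList input_data_indices kv.1) kv.2 0))
         PySem.Dict.empty)
      (output_data_indices.map (fun kv => (kv.1, PySem.List.pyGetD kv.2 ii.1 0)))).items)
  let tracked := PySem.List.dedup (element_data_indices.flatMap (fun i => i.map Prod.fst))
  let esi := (tracked.filter (fun k => pvHasKey sequence_indices k)).map (fun k =>
      (k, (element_data_indices.filter (fun i => pvRowHas i k)).map (fun i =>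
            PySem.List.pyGetD (pvGetList sequence_indices k) (pvRowGet i k) 0)))
  let esrc := (tracked.filter (fun k => pvHasKey source_indices k)).map (fun k =>
      (k, (element_data_indices.filter (fun i => pvRowHas i k)).map (fun i =>
            PySem.List.pyGetD (pvGetList source_indices k) (pvRowGet i k) 0)))
  (new_elements, esi, esrc)

-- ===== PRECONDITION & SPEC =====
-- Pre_ excludes (a) inputs on which the Python raises: a row key missing from
-- input_data_indices (KeyError), an index outside Python range for the input/sequence/
-- source list it subscripts, or an output list shorter than the number of rows
-- (IndexError); and (b) rows with duplicate keys, which do not represent a Python dict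
-- (the arguments model dicts, whose keys are necessarily distinct).
def Pre_generate_new_elements (input_data_indices : List (String × List Int)) (output_data_indices : List (String × List Int)) (element_data_indices : List (List (String × Int))) (sequence_indices : List (String × List Int)) (source_indices : List (String × List Int)) : Prop :=
  (∀ i ∈ element_data_indices, (i.map Prod.fst).Nodup) ∧
  (∀ i ∈ element_data_indices, ∀ kv ∈ i,
      pvHasKey input_data_indices kv.1 = true ∧
      PySem.Raise.InRange (pvGetList input_data_indices kv.1).length kv.2 ∧
      (pvHasKey sequence_indices kv.1 = true →
        PySem.Raise.InRange (pvGetList sequence_indices kv.1).length kv.2) ∧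
      (pvHasKey source_indices kv.1 = true →
        PySem.Raise.InRange (pvGetList source_indices kv.1).length kv.2)) ∧
  (∀ kv ∈ output_data_indices, element_data_indices.length ≤ kv.2.length)
instance (input_data_indices : List (String × List Int)) (output_data_indices : List (String × List Int)) (element_data_indices : List (List (String × Int))) (sequence_indices : List (String × List Int)) (source_indices : List (String × List Int)) : Decidable (Pre_generate_new_elements input_data_indices output_data_indices element_data_indices sequence_indices source_indices) := by unfold Pre_generate_new_elements; infer_instance

def pvWitness_generate_new_elements : (List (String × List Int)) × (List (String × List Int)) × (List (List (String × Int))) × (List (String × List Int)) × (List (String × List Int)) :=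
  ([("a", [5, 6])], [("o", [7])], [[("a", 1)]], [("a", [9, 8])], [])

def Spec_generate_new_elements (input_data_indices : List (String × List Int)) (output_data_indices : List (String × List Int)) (element_data_indices : List (List (String × Int))) (sequence_indices : List (String × List Int)) (source_indices : List (String × List Int)) (out : (List (List (String × Int))) × (List (String × List Int)) × (List (String × List Int))) : Prop := out = generate_new_elements_alt input_data_indices output_data_indices element_data_indices sequence_indices source_indices
instance (input_data_indices : List (String × List Int)) (output_data_indices : List (String × List Int)) (element_data_indices : List (List (String × Int))) (sequence_indices : List (String × List Int)) (source_indices : List (String × List Int)) (out : (List (List (String × Int))) × (List (String × List Int)) × (List (String × List Int))) : Decidable (Spec_generate_new_elements input_data_indices output_data_indices element_data_indices sequence_indices source_indices out) := by unfold Spec_generate_new_elements; infer_instance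

-- ===== CLAIM (what is proved, stated in full; the proofs are below) =====
def Claim_equal_generate_new_elements : Prop := ∀ (input_data_indices : List (String × List Int)) (output_data_indices : List (String × List Int)) (element_data_indices : List (List (String × Int))) (sequence_indices : List (String × List Int)) (source_indices : List (String × List Int)), Dom_generate_new_elements input_data_indices output_data_indices element_data_indices sequence_indices source_indices → Pre_generate_new_elements input_data_indices output_data_indices element_data_indices sequence_indices source_indices → Spec_generate_new_elements input_data_indices output_data_indices element_data_indices sequence_indices source_indices (generate_new_elements input_data_indices output_data_indices element_data_indices sequence_indices source_indices)

-- ===== LEMMAS AND PROOFS =====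
-- Generic building blocks, parameterised by the membership test `has` (k in q) and the
-- tracked value `f k v` (= q[k][v]); instantiated for sequence_ and source_indices.
def pvStep (has : String → Bool) (f : String → Int → Int)
    (d : PySem.Dict String (List Int)) (kv : String × Int) : PySem.Dict String (List Int) :=
  if has kv.1 then d.modify kv.1 [] (· ++ [f kv.1 kv.2]) else d
lemma pv_rowHas_nil (x : String) : pvRowHas [] x = false := rfl
lemma pv_rowHas_cons (kv : String × Int) (t : List (String × Int)) (x : String) :
    pvRowHas (kv :: t) x = (kv.1 == x || pvRowHas t x) := by
  simp [pvRowHas, PySem.Dict.contains]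
lemma pv_rowGet_cons (kv : String × Int) (t : List (String × Int)) (x : String) :
    pvRowGet (kv :: t) x = if kv.1 == x then kv.2 else pvRowGet t x := by
  obtain ⟨k, v⟩ := kv
  simp only [pvRowGet, PySem.Dict.get?_mk_cons]
  split <;> rfl
lemma pv_rowHas_iff (i : List (String × Int)) (k : String) :
    pvRowHas i k = true ↔ k ∈ i.map Prod.fst := by
  simp [pvRowHas, PySem.Dict.contains, List.any_eq_true]
lemma pv_row_step (has : String → Bool) (f : String → Int → Int) :
    ∀ (r : List (String × Int)) (d : PySem.Dict String (List Int)),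
    (r.map Prod.fst).Nodup → d.keys.Nodup →
    (r.foldl (pvStep has f) d).items
      = d.items.map (fun p =>
          if has p.1 && pvRowHas r p.1 then (p.1, p.2 ++ [f p.1 (pvRowGet r p.1)]) else p)
        ++ ((r.map Prod.fst).filter (fun k => has k && !(d.contains k))).map
             (fun k => (k, [f k (pvRowGet r k)])) := by
  intro r
  induction r with
  | nil =>
    intro d _ _
    simp [pv_rowHas_nil]
  | cons kv t ih =>
    intro d hr hd
    have hmc : (kv.1 :: t.map Prod.fst).Nodup := by simpa using hr
    have hkv : kv.1 ∉ t.map Prod.fst := (List.nodup_cons.mp hmc).1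
    have ht : (t.map Prod.fst).Nodup := (List.nodup_cons.mp hmc).2
    have hrhf : pvRowHas t kv.1 = false := by
      rcases Bool.eq_false_or_eq_true (pvRowHas t kv.1) with h | h
      · exact absurd ((pv_rowHas_iff t kv.1).mp h) hkv
      · exact h
    simp only [List.foldl_cons]
    by_cases hhas : has kv.1
    · have hstep : pvStep has f d kv = d.modify kv.1 [] (· ++ [f kv.1 kv.2]) := by
        simp [pvStep, hhas]
      rw [hstep]
      by_cases hc : d.contains kv.1 = true
      · set d' := d.modify kv.1 [] (· ++ [f kv.1 kv.2]) with hd'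
        have hitems : d'.items = d.items.map (fun p =>
            if p.1 == kv.1 then (kv.1, d.getD kv.1 [] ++ [f kv.1 kv.2]) else p) := by
          simp [hd', PySem.Dict.modify, PySem.Dict.items_insert, hc]
        have hkeys : d'.keys.Nodup := by
          simp only [hd', PySem.Dict.modify]
          exact PySem.Dict.nodup_keys_insert d kv.1 _ hd
        have hcont : ∀ k ∈ t.map Prod.fst, d'.contains k = d.contains k := by
          intro k hk
          have hne : (k == kv.1) = false := by
            simp only [beq_eq_false_iff_ne, ne_eq]
            rintro rfl; exact hkv hk
          simp [hd', PySem.Dict.contains_modify, hne]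
        rw [ih d' ht hkeys, hitems]
        congr 1
        · rw [List.map_map]
          apply List.map_congr_left
          intro p hp
          by_cases hpk : p.1 = kv.1
          · have hpv : d.getD p.1 [] = p.2 :=
              PySem.Dict.getD_of_mem_items d (by simpa using hp) hd []
            simp [Function.comp_apply, hpk, hrhf, pv_rowHas_cons, pv_rowGet_cons, hhas,
              hpk ▸ hpv]
          · have hbeq' : (kv.1 == p.1) = false := by simpa using (Ne.symm hpk)
            simp [Function.comp_apply, hpk, pv_rowHas_cons, pv_rowGet_cons, hbeq']
        · have hfil : List.filter (fun k => has k && !d'.contains k) (t.map Prod.fst)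
              = List.filter (fun k => has k && !d.contains k) (t.map Prod.fst) :=
            List.filter_congr (by intro k hk; rw [hcont k hk])
          simp only [List.map_cons, List.filter_cons, hhas, hc]
          simp only [Bool.not_true, Bool.and_false]
          rw [hfil]
          apply List.map_congr_left
          intro k hk
          have hkmem := List.mem_filter.mp hk
          have hne : (kv.1 == k) = false := by
            simp only [beq_eq_false_iff_ne, ne_eq]
            rintro rfl; exact hkv hkmem.1
          simp [pv_rowGet_cons, hne]
      · -- new key: appended
        set d' := d.modify kv.1 [] (· ++ [f kv.1 kv.2]) with hd'
        have hcf : d.contains kv.1 = false := by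
          rcases Bool.eq_false_or_eq_true (d.contains kv.1) with h | h
          · exact absurd h hc
          · exact h
        have hitems : d'.items = d.items ++ [(kv.1, [f kv.1 kv.2])] := by
          simp [hd', PySem.Dict.modify, PySem.Dict.items_insert, hcf,
            PySem.Dict.getD_of_not_contains d ([] : List Int) hcf]
        have hkeys : d'.keys.Nodup := by
          simp only [hd', PySem.Dict.modify]
          exact PySem.Dict.nodup_keys_insert d kv.1 _ hd
        have hcont : ∀ k ∈ t.map Prod.fst, d'.contains k = d.contains k := by
          intro k hk
          have hne : (k == kv.1) = false := by
            simp only [beq_eq_false_iff_ne, ne_eq]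
            rintro rfl; exact hkv hk
          simp [hd', PySem.Dict.contains_modify, hne]
        rw [ih d' ht hkeys, hitems]
        rw [List.map_append]
        have hpk_ne : ∀ p ∈ d.items, p.1 ≠ kv.1 := by
          intro p hp hpe
          have : d.contains p.1 = true := by
            simp only [PySem.Dict.contains, List.any_eq_true]
            exact ⟨p, hp, by simp⟩
          rw [hpe] at this; exact absurd this hc
        have hmap1 : d.items.map (fun p =>
              if has p.1 && pvRowHas t p.1 then (p.1, p.2 ++ [f p.1 (pvRowGet t p.1)]) else p)
            = d.items.map (fun p =>
              if has p.1 && pvRowHas (kv :: t) p.1 then (p.1, p.2 ++ [f p.1 (pvRowGet (kv :: t) p.1)]) else p) := by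
          apply List.map_congr_left
          intro p hp
          have hbeq' : (kv.1 == p.1) = false := by
            simp only [beq_eq_false_iff_ne, ne_eq]
            exact fun h => (hpk_ne p hp) h.symm
          simp [pv_rowHas_cons, pv_rowGet_cons, hbeq']
        have hsingle : List.map (fun p =>
              if has p.1 && pvRowHas t p.1 then (p.1, p.2 ++ [f p.1 (pvRowGet t p.1)]) else p)
              [(kv.1, [f kv.1 kv.2])] = [(kv.1, [f kv.1 kv.2])] := by
          simp [hrhf]
        have hfil : List.filter (fun k => has k && !d'.contains k) (t.map Prod.fst)
            = List.filter (fun k => has k && !d.contains k) (t.map Prod.fst) :=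
          List.filter_congr (by intro k hk; rw [hcont k hk])
        have hmap2 : List.map (fun k => (k, [f k (pvRowGet t k)]))
              (List.filter (fun k => has k && !d.contains k) (t.map Prod.fst))
            = List.map (fun k => (k, [f k (pvRowGet (kv :: t) k)]))
              (List.filter (fun k => has k && !d.contains k) (t.map Prod.fst)) := by
          apply List.map_congr_left
          intro k hk
          have hkmem := List.mem_filter.mp hk
          have hne : (kv.1 == k) = false := by
            simp only [beq_eq_false_iff_ne, ne_eq]
            rintro rfl; exact hkv hkmem.1
          simp [pv_rowGet_cons, hne]
        rw [hmap1, hsingle, hfil, hmap2]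
        simp only [List.map_cons, List.filter_cons, hhas, hcf]
        simp only [Bool.not_false, Bool.and_true, if_true, List.map_cons]
        rw [pv_rowGet_cons]
        simp [List.append_assoc]
    · -- has kv.1 = false
      have hhf : has kv.1 = false := by
        rcases Bool.eq_false_or_eq_true (has kv.1) with h | h
        · exact absurd h hhas
        · exact h
      have hstep : pvStep has f d kv = d := by simp [pvStep, hhf]
      rw [hstep, ih d ht hd]
      congr 1
      · apply List.map_congr_left
        intro p hp
        by_cases hpk : p.1 = kv.1
        · simp [hpk, hhf]
        · have hbeq' : (kv.1 == p.1) = false := by simpa using (Ne.symm hpk)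
          simp [pv_rowHas_cons, pv_rowGet_cons, hbeq']
      · simp only [List.map_cons, List.filter_cons, hhf]
        simp only [Bool.false_and]
        apply List.map_congr_left
        intro k hk
        have hkmem := List.mem_filter.mp hk
        have hne : (kv.1 == k) = false := by
          simp only [beq_eq_false_iff_ne, ne_eq]
          rintro rfl; exact hkv hkmem.1
        simp [pv_rowGet_cons, hne]
def pvCol (f : String → Int → Int) (rows : List (List (String × Int))) (k : String) : List Int :=
  (rows.filter (fun i => pvRowHas i k)).map (fun i => f k (pvRowGet i k))
def pvColForm (has : String → Bool) (f : String → Int → Int)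
    (rows : List (List (String × Int))) : List (String × List Int) :=
  ((PySem.List.dedup (rows.flatMap (fun i => i.map Prod.fst))).filter has).map
    (fun k => (k, pvCol f rows k))
lemma pvCol_append_singleton (f : String → Int → Int) (rows : List (List (String × Int)))
    (r : List (String × Int)) (k : String) :
    pvCol f (rows ++ [r]) k
      = pvCol f rows k ++ (if pvRowHas r k then [f k (pvRowGet r k)] else []) := by
  simp only [pvCol, List.filter_append, List.map_append, List.filter_cons, List.filter_nil]
  by_cases h : pvRowHas r k <;> simp [h]
lemma pv_track_eq (has : String → Bool) (f : String → Int → Int) :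
    ∀ (rows : List (List (String × Int))), (∀ i ∈ rows, (i.map Prod.fst).Nodup) →
    (rows.foldl (fun d r => r.foldl (pvStep has f) d) PySem.Dict.empty).items
      = pvColForm has f rows := by
  intro rows
  induction rows using List.reverseRecOn with
  | nil => intro _; rfl
  | append_singleton rows r ih =>
    intro h
    have hrows : ∀ i ∈ rows, (i.map Prod.fst).Nodup := fun i hi => h i (by simp [hi])
    have hr : (r.map Prod.fst).Nodup := h r (by simp)
    rw [List.foldl_append]
    simp only [List.foldl_cons, List.foldl_nil]
    set D := rows.foldl (fun d r => r.foldl (pvStep has f) d) PySem.Dict.empty with hD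
    set K := PySem.List.dedup (rows.flatMap (fun i => i.map Prod.fst)) with hK
    have hDitems : D.items = pvColForm has f rows := ih hrows
    have hDkeys : D.keys = K.filter has := by
      rw [PySem.Dict.keys, hDitems, pvColForm, List.map_map]
      have hcomp : ((fun x : String × List Int => x.1) ∘ fun k : String => (k, pvCol f rows k)) = id := rfl
      rw [hcomp, List.map_id]
    have hDnodup : D.keys.Nodup := by
      rw [hDkeys]
      exact List.Nodup.filter _ (PySem.Set.nodup_ofList _)
    have hmemK : ∀ k, k ∈ K ↔ ∃ i ∈ rows, k ∈ i.map Prod.fst := by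
      intro k
      rw [hK, PySem.List.dedup, PySem.Set.mem_ofList, List.mem_flatMap]
    have hDc : ∀ k, D.contains k = true ↔ (k ∈ K ∧ has k = true) := by
      intro k
      rw [PySem.Dict.contains_iff_mem_keys, hDkeys, List.mem_filter]
    -- expand the new key set
    have hKnew : PySem.List.dedup ((rows ++ [r]).flatMap (fun i => i.map Prod.fst))
        = K ++ (r.map Prod.fst).filter (fun y => !(PySem.Set.contains K y)) := by
      rw [List.flatMap_append]
      simp only [List.flatMap_cons, List.flatMap_nil, List.append_nil]
      rw [PySem.List.dedup, PySem.Set.ofList_append, PySem.Set.update_eq_append_filter,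
        PySem.Set.ofList_eq_self_of_nodup _ hr]
      rfl
    rw [pv_row_step has f r D hr hDnodup, hDitems]
    simp only [pvColForm, hKnew, List.filter_append, List.map_append, List.map_map]
    congr 1
    · -- old keys part
      apply List.map_congr_left
      intro k hk
      have hkh : has k = true := (List.mem_filter.mp hk).2
      simp only [Function.comp_apply, hkh, Bool.true_and, pvCol_append_singleton]
      by_cases hrk : pvRowHas r k <;> simp [hrk]
    · -- new keys part
      have hfil : (r.map Prod.fst).filter (fun k => has k && !(D.contains k))
          = ((r.map Prod.fst).filter (fun y => !(PySem.Set.contains K y))).filter has := by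
        rw [List.filter_filter]
        apply List.filter_congr
        intro k _
        by_cases hhk : has k = true
        · by_cases hKk : k ∈ K
          · have : D.contains k = true := (hDc k).mpr ⟨hKk, hhk⟩
            have hKc : PySem.Set.contains K k = true := by
              rw [PySem.Set.contains_iff]; exact hKk
            simp [this, hhk, hKk]
          · have : D.contains k = false := by
              rcases Bool.eq_false_or_eq_true (D.contains k) with hb | hb
              · exact absurd ((hDc k).mp hb).1 hKk
              · exact hb
            have hKc : PySem.Set.contains K k = false := by
              rcases Bool.eq_false_or_eq_true (PySem.Set.contains K k) with hb | hb
              · exact absurd (PySem.Set.contains_iff K k |>.mp hb) hKk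
              · exact hb
            simp [this, hhk, hKk]
        · have hhf : has k = false := by
            rcases Bool.eq_false_or_eq_true (has k) with hb | hb
            · exact absurd hb hhk
            · exact hb
          simp [hhf]
      rw [hfil]
      apply List.map_congr_left
      intro k hk
      have hkN := List.mem_filter.mp hk
      have hkr : k ∈ r.map Prod.fst := (List.mem_filter.mp hkN.1).1
      have hkK : k ∉ K := by
        intro hKk
        have hb := (List.mem_filter.mp hkN.1).2
        rw [Bool.not_eq_eq_eq_not, Bool.not_true] at hb
        have hcontra := (PySem.Set.contains_iff K k).mpr hKk
        rw [hcontra] at hb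
        exact absurd hb (by decide)
      have hcolnil : pvCol f rows k = [] := by
        simp only [pvCol, List.map_eq_nil_iff, List.filter_eq_nil_iff]
        intro i hi hbad
        exact hkK ((hmemK k).mpr ⟨i, hi, (pv_rowHas_iff i k).mp hbad⟩)
      have hrk : pvRowHas r k = true := (pv_rowHas_iff r k).mpr hkr
      rw [pvCol_append_singleton]
      simp [hcolnil, hrk]
lemma pv_foldl_triple {α β γ ε : Type} (f1 : α → ε → α) (f2 : β → ε → β) (f3 : γ → ε → γ)
    (l : List ε) (a : α) (b : β) (c : γ) :
    l.foldl (fun s e => (f1 s.1 e, f2 s.2.1 e, f3 s.2.2 e)) (a, b, c)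
      = (l.foldl f1 a, l.foldl f2 b, l.foldl f3 c) := by
  induction l generalizing a b c with
  | nil => rfl
  | cons x t ih => simpa using ih (f1 a x) (f2 b x) (f3 c x)
def pvElem (inp out : List (String × List Int)) (ii : Int × List (String × Int)) : List (String × Int) :=
  (out.foldl (fun d kv => d.insert kv.1 (PySem.List.pyGetD kv.2 ii.1 0))
    (ii.2.foldl (fun (d : PySem.Dict String Int) kv =>
       d.insert kv.1 (PySem.List.pyGetD (pvGetList inp kv.1) kv.2 0)) PySem.Dict.empty)).items
lemma pv_A_eq (inp out ed seq src) :
    generate_new_elements inp out ed seq src =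
    ( (PySem.List.enumerate ed 0).map (pvElem inp out),
      (ed.foldl (fun d r => r.foldl (pvStep (pvHasKey seq)
          (fun k v => PySem.List.pyGetD (pvGetList seq k) v 0)) d) PySem.Dict.empty).items,
      (ed.foldl (fun d r => r.foldl (pvStep (pvHasKey src)
          (fun k v => PySem.List.pyGetD (pvGetList src k) v 0)) d) PySem.Dict.empty).items ) := by
  unfold generate_new_elements
  have hstep : ∀ (st : List (List (String × Int)) × PySem.Dict String (List Int) × PySem.Dict String (List Int))
      (ii : Int × List (String × Int)),
      (fun (st : List (List (String × Int)) × PySem.Dict String (List Int) × PySem.Dict String (List Int)) ii =>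
        let elem1 : PySem.Dict String Int :=
          ii.2.foldl (fun d kv =>
            d.insert kv.1 (PySem.List.pyGetD (pvGetList inp kv.1) kv.2 0))
            PySem.Dict.empty
        let elem2 := out.foldl (fun d kv =>
            d.insert kv.1 (PySem.List.pyGetD kv.2 ii.1 0)) elem1
        ii.2.foldl
          (fun st kv =>
            let st2 := if pvHasKey seq kv.1 then
                (st.1, st.2.1.modify kv.1 []
                   (· ++ [PySem.List.pyGetD (pvGetList seq kv.1) kv.2 0]), st.2.2)
              else st
            if pvHasKey src kv.1 then
                (st2.1, st2.2.1, st2.2.2.modify kv.1 []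
                   (· ++ [PySem.List.pyGetD (pvGetList src kv.1) kv.2 0]))
            else st2)
          (st.1 ++ [elem2.items], st.2.1, st.2.2)) st ii
      = (st.1 ++ [pvElem inp out ii],
         ii.2.foldl (pvStep (pvHasKey seq) (fun k v => PySem.List.pyGetD (pvGetList seq k) v 0)) st.2.1,
         ii.2.foldl (pvStep (pvHasKey src) (fun k v => PySem.List.pyGetD (pvGetList src k) v 0)) st.2.2) := by
    intro st ii
    simp only []
    have hinner : (fun (st : List (List (String × Int)) × PySem.Dict String (List Int) × PySem.Dict String (List Int)) (kv : String × Int) =>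
        let st2 := if pvHasKey seq kv.1 then
            (st.1, st.2.1.modify kv.1 []
               (· ++ [PySem.List.pyGetD (pvGetList seq kv.1) kv.2 0]), st.2.2)
          else st
        if pvHasKey src kv.1 then
            (st2.1, st2.2.1, st2.2.2.modify kv.1 []
               (· ++ [PySem.List.pyGetD (pvGetList src kv.1) kv.2 0]))
        else st2)
      = (fun st kv =>
          (st.1,
           pvStep (pvHasKey seq) (fun k v => PySem.List.pyGetD (pvGetList seq k) v 0) st.2.1 kv,
           pvStep (pvHasKey src) (fun k v => PySem.List.pyGetD (pvGetList src k) v 0) st.2.2 kv)) := by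
      funext s kv
      by_cases h1 : pvHasKey seq kv.1 <;> by_cases h2 : pvHasKey src kv.1 <;>
        simp [pvStep, h1, h2]
    rw [hinner, pv_foldl_triple (fun a _ => a)
      (pvStep (pvHasKey seq) (fun k v => PySem.List.pyGetD (pvGetList seq k) v 0))
      (pvStep (pvHasKey src) (fun k v => PySem.List.pyGetD (pvGetList src k) v 0))]
    rw [PySem.List.foldl_ignore]
    rfl
  rw [funext (fun st => funext (fun ii => hstep st ii))]
  rw [pv_foldl_triple (fun a ii => a ++ [pvElem inp out ii])
    (fun b (ii : Int × List (String × Int)) => ii.2.foldl (pvStep (pvHasKey seq) (fun k v => PySem.List.pyGetD (pvGetList seq k) v 0)) b)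
    (fun c (ii : Int × List (String × Int)) => ii.2.foldl (pvStep (pvHasKey src) (fun k v => PySem.List.pyGetD (pvGetList src k) v 0)) c)]
  rw [PySem.List.foldl_append_singleton_eq_map]
  have hfold : ∀ (q : List (String × List Int)),
      (PySem.List.enumerate ed 0).foldl
        (fun b (ii : Int × List (String × Int)) => ii.2.foldl (pvStep (pvHasKey q) (fun k v => PySem.List.pyGetD (pvGetList q k) v 0)) b)
        PySem.Dict.empty
      = ed.foldl (fun d r => r.foldl (pvStep (pvHasKey q) (fun k v => PySem.List.pyGetD (pvGetList q k) v 0)) d) PySem.Dict.empty := by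
    intro q
    conv_rhs => rw [← PySem.List.map_snd_enumerate ed 0, List.foldl_map]
  rw [hfold seq, hfold src]
  rfl
theorem pv_main (inp out seq src : List (String × List Int)) (ed : List (List (String × Int)))
    (hnd : ∀ i ∈ ed, (i.map Prod.fst).Nodup) :
    generate_new_elements inp out ed seq src = generate_new_elements_alt inp out ed seq src := by
  rw [pv_A_eq]
  unfold generate_new_elements_alt
  rw [pv_track_eq (pvHasKey seq) (fun k v => PySem.List.pyGetD (pvGetList seq k) v 0) ed hnd,
      pv_track_eq (pvHasKey src) (fun k v => PySem.List.pyGetD (pvGetList src k) v 0) ed hnd]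
  have hrow : (fun ii : Int × List (String × Int) =>
      (PySem.Dict.update
        (ii.2.foldl (fun (d : PySem.Dict String Int) kv =>
           d.insert kv.1 (PySem.List.pyGetD (pvGetList inp kv.1) kv.2 0))
           PySem.Dict.empty)
        (out.map (fun kv => (kv.1, PySem.List.pyGetD kv.2 ii.1 0)))).items)
      = pvElem inp out := by
    funext ii
    simp [pvElem, PySem.Dict.update, List.foldl_map]
  rw [← hrow]
  rfl

-- ===== VERDICT (by name: the statement is the Claim_ definition above) =====
theorem generate_new_elements_spec : Claim_equal_generate_new_elements := by
  intro input_data_indices output_data_indices element_data_indices sequence_indices source_indices _hdom hpre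
  unfold Spec_generate_new_elements
  exact pv_main input_data_indices output_data_indices sequence_indices source_indices
    element_data_indices hpre.1
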